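-- pv_equiv track=rewrite | github.com/unphydra/AOC-2021 | Day14/part1/polymer_formula.py | calculate_most_sub_least
-- ===== SOURCE A (Python) =====
-- def calculate_most_sub_least(formula):
--     counts = {}
--     results = []
--     formulas = list(formula)
--     for char in formulas:
--         if counts.get(char) == None:
--             count = formulas.count(char)
--             counts.update({char: count})
--             results.append({"char": char, "count": count})
--     sortedFormulas = sorted(results, key=lambda x: x["count"])
--     lowest = sortedFormulas[0]
--     highest = sortedFormulas[-1]
--     return highest["count"] - lowest["count"]
-- ===== SOURCE B (Python) =====
-- def run_lengths(chars):
--     # chars is sorted, so equal characters are adjacent: peel off one run at a time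
--     if not chars:
--         return []
--     head = chars[0]
--     run = 1
--     while run < len(chars) and chars[run] == head:
--         run += 1
--     return [run] + run_lengths(chars[run:])
--
-- def calculate_most_sub_least(formula):
--     lengths = run_lengths(sorted(formula))
--     s = sorted(lengths)
--     return s[-1] - s[0]
-- ===== Notes on version B (the rewrite author's own statement) =====
-- stated objective: alternative
-- what changed: A builds a dict of seen characters and calls formulas.count for each new one, then sorts the records by count; B sorts the characters once, scans them grouping adjacent equal characters into run lengths, and returns largest minus smallest run length.
import Mathlib
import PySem

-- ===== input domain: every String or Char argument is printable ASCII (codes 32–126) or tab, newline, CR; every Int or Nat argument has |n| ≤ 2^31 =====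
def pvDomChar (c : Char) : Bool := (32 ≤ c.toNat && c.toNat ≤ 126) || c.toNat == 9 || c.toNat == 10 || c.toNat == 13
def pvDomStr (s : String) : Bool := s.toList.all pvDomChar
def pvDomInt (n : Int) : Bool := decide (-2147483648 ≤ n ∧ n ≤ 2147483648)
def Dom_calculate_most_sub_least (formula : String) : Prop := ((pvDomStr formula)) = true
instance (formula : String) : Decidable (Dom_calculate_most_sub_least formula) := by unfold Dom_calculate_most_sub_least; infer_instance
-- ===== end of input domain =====

-- B is a different decomposition: sort the characters once, peel off runs of equal adjacent
-- characters, and subtract the smallest run length from the largest; no dict of counts and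
-- no repeated list.count scan.  Objective: alternative.

-- ===== PORT A =====
-- A's per-character record {"char": c, "count": n} has two fixed string keys, so it is
-- ported as the pair (c, n); x["count"] is .2, x["char"] is .1.
def calculate_most_sub_least (formula : String) : Int :=
  let formulas := formula.toList
  let st := formulas.foldl
    (fun (st : PySem.Dict Char Int × List (Char × Int)) char =>
      if st.1.get? char = none then
        (st.1.insert char (PySem.List.count formulas char : Int),
         st.2 ++ [(char, (PySem.List.count formulas char : Int))])
      else st)
    (PySem.Dict.empty, [])
  let sortedFormulas := PySem.List.sorted st.2 (fun x => x.2) false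
  let lowest := PySem.List.pyGetD sortedFormulas 0 (' ', 0)     -- [0]; IndexError excluded by Pre_
  let highest := PySem.List.pyGetD sortedFormulas (-1) (' ', 0) -- [-1]; IndexError excluded by Pre_
  highest.2 - lowest.2

-- ===== PORT B =====
-- run_lengths: the index scan over the leading run is the takeWhile split of the tail;
-- chars[run:] is the corresponding dropWhile remainder.
def run_lengths : List Char → List Int
  | [] => []
  | head :: rest =>
      ((1 + (rest.takeWhile (· == head)).length : Nat) : Int)
        :: run_lengths (rest.dropWhile (· == head))
termination_by l => l.length
decreasing_by
  simp only [List.length_cons]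
  exact Nat.lt_succ_of_le (List.length_dropWhile_le _ _)

def calculate_most_sub_least_alt (formula : String) : Int :=
  let lengths := run_lengths (PySem.List.sorted formula.toList (fun x => x) false)
  let s := PySem.List.sorted lengths (fun x => x) false
  PySem.List.pyGetD s (-1) 0 - PySem.List.pyGetD s 0 0  -- s[-1] - s[0]; IndexError excluded by Pre_

-- ===== PRECONDITION & SPEC =====
-- Both programs raise IndexError on the empty string (indexing into an empty sorted list);
-- Pre_ excludes exactly that input.
def Pre_calculate_most_sub_least (formula : String) : Prop := formula ≠ ""
instance (formula : String) : Decidable (Pre_calculate_most_sub_least formula) := by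
  unfold Pre_calculate_most_sub_least; infer_instance
def pvWitness_calculate_most_sub_least : String := "NNCB"

def Spec_calculate_most_sub_least (formula : String) (out : Int) : Prop :=
  out = calculate_most_sub_least_alt formula
instance (formula : String) (out : Int) : Decidable (Spec_calculate_most_sub_least formula out) := by
  unfold Spec_calculate_most_sub_least; infer_instance

-- ===== CLAIM (what is proved, stated in full; the proofs are below) =====
def Claim_equal_calculate_most_sub_least : Prop :=
  ∀ (formula : String), Dom_calculate_most_sub_least formula →
    Pre_calculate_most_sub_least formula →
    Spec_calculate_most_sub_least formula (calculate_most_sub_least formula)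

-- ===== LEMMAS AND PROOFS =====

-- A's fold: the dict is only a membership test on the collected first components, so the
-- results list gains each character once, paired with its total count in `formulas`.
theorem foldA_inv (formulas : List Char) :
    ∀ (l : List Char) (d : PySem.Dict Char Int) (res : List (Char × Int)),
      (∀ c, d.get? c = none ↔ c ∉ res.map Prod.fst) →
      (∀ c, c ∈ ((l.foldl
          (fun (st : PySem.Dict Char Int × List (Char × Int)) char =>
            if st.1.get? char = none then
              (st.1.insert char (PySem.List.count formulas char : Int),
               st.2 ++ [(char, (PySem.List.count formulas char : Int))])
            else st) (d, res)).2).map Prod.fst ↔ c ∈ res.map Prod.fst ∨ c ∈ l)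
      ∧ ((res.map Prod.fst).Nodup → (((l.foldl
          (fun (st : PySem.Dict Char Int × List (Char × Int)) char =>
            if st.1.get? char = none then
              (st.1.insert char (PySem.List.count formulas char : Int),
               st.2 ++ [(char, (PySem.List.count formulas char : Int))])
            else st) (d, res)).2).map Prod.fst).Nodup)
      ∧ (∀ p ∈ (l.foldl
          (fun (st : PySem.Dict Char Int × List (Char × Int)) char =>
            if st.1.get? char = none then
              (st.1.insert char (PySem.List.count formulas char : Int),
               st.2 ++ [(char, (PySem.List.count formulas char : Int))])
            else st) (d, res)).2, p ∈ res ∨ p.2 = (PySem.List.count formulas p.1 : Int)) := by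
  intro l
  induction l with
  | nil =>
      intro d res hinv
      refine ⟨fun c => by simp, fun h => h, fun p hp => Or.inl hp⟩
  | cons char l' ih =>
      intro d res hinv
      rw [List.foldl_cons]
      by_cases hc : d.get? char = none
      · have hnotin : char ∉ res.map Prod.fst := (hinv char).mp hc
        have hstep : (if (d, res).1.get? char = none then
                ((d, res).1.insert char (PySem.List.count formulas char : Int),
                 (d, res).2 ++ [(char, (PySem.List.count formulas char : Int))])
              else (d, res))
              = (d.insert char (PySem.List.count formulas char : Int),
                 res ++ [(char, (PySem.List.count formulas char : Int))]) := by
          simp [hc]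
        rw [hstep]
        have hinv' : ∀ c, (d.insert char (PySem.List.count formulas char : Int)).get? c = none
              ↔ c ∉ ((res ++ [(char, (PySem.List.count formulas char : Int))]).map Prod.fst) := by
          intro c
          rw [PySem.Dict.get?_insert]
          by_cases h : c = char
          · simp [h]
          · simp [h, hinv c]
        obtain ⟨M, N, P⟩ := ih (d.insert char (PySem.List.count formulas char : Int))
          (res ++ [(char, (PySem.List.count formulas char : Int))]) hinv'
        refine ⟨?_, ?_, ?_⟩
        · intro c
          rw [M c]
          simp only [List.map_append, List.map_cons, List.map_nil, List.mem_append,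
            List.mem_cons]
          tauto
        · intro h
          apply N
          simp only [List.map_append, List.map_cons, List.map_nil]
          rw [List.nodup_append]
          refine ⟨h, List.nodup_singleton _, fun a ha b hb hab => ?_⟩
          have hbc : b = char := by simpa using hb
          exact hnotin ((hab.trans hbc) ▸ ha)
        · intro p hp
          rcases P p hp with h | h
          · rcases List.mem_append.mp h with h' | h'
            · exact Or.inl h'
            · have : p = (char, (PySem.List.count formulas char : Int)) := by simpa using h'
              exact Or.inr (by rw [this])
          · exact Or.inr h
      · have hin : char ∈ res.map Prod.fst := by
            by_contra h
            exact hc ((hinv char).mpr h)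
        have hstep : (if (d, res).1.get? char = none then
                ((d, res).1.insert char (PySem.List.count formulas char : Int),
                 (d, res).2 ++ [(char, (PySem.List.count formulas char : Int))])
              else (d, res)) = (d, res) := by
          simp [hc]
        rw [hstep]
        obtain ⟨M, N, P⟩ := ih d res hinv
        refine ⟨?_, N, P⟩
        intro c
        rw [M c]
        simp only [List.mem_cons]
        constructor
        · rintro (h | h)
          · exact Or.inl h
          · exact Or.inr (Or.inr h)
        · rintro (h | h | h)
          · exact Or.inl h
          · subst h; exact Or.inl hin
          · exact Or.inr h

-- B's run_lengths on a sorted list: the run lengths are exactly the multiplicities of the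
-- distinct characters.
theorem run_lengths_spec :
    ∀ (l : List Char), l.Pairwise (· ≤ ·) →
      ∃ d : List Char, d.Nodup ∧ (∀ c, c ∈ d ↔ c ∈ l) ∧
        run_lengths l = d.map (fun c => (PySem.List.count l c : Int)) := by
  intro l
  induction l using run_lengths.induct with
  | case1 =>
      intro _
      exact ⟨[], List.nodup_nil, by simp, by simp [run_lengths]⟩
  | case2 head rest ih =>
      intro hp
      have hrest : rest.takeWhile (· == head) ++ rest.dropWhile (· == head) = rest :=
        List.takeWhile_append_dropWhile
      have htall : ∀ y ∈ rest.takeWhile (· == head), y = head := by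
        intro y hy
        have := List.mem_takeWhile_imp hy
        simpa using this
      have hrsub : (rest.dropWhile (· == head)).Sublist rest := List.dropWhile_sublist _
      have hrp : (rest.dropWhile (· == head)).Pairwise (· ≤ ·) :=
        List.Pairwise.sublist (hrsub.trans (List.sublist_cons_self head rest)) hp
      have hhead_le : ∀ y ∈ rest, head ≤ y := fun y hy => List.rel_of_pairwise_cons hp hy
      have hrne : ∀ y ∈ rest.dropWhile (· == head), y ≠ head := by
        have H := List.head?_dropWhile_not (fun y => y == head) rest
        cases hR : rest.dropWhile (fun y => y == head) with
        | nil =>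
            intro y hy
            simp at hy
        | cons r0 r' =>
            rw [hR] at H
            simp only [List.head?_cons] at H
            have hr0 : r0 ≠ head := by simpa using H
            have hr0mem : r0 ∈ rest := (hR ▸ hrsub).subset List.mem_cons_self
            have hlt : head < r0 := lt_of_le_of_ne (hhead_le r0 hr0mem) (Ne.symm hr0)
            intro y hy
            rcases List.mem_cons.mp hy with rfl | hy'
            · exact hr0
            · have : r0 ≤ y := List.rel_of_pairwise_cons (hR ▸ hrp) hy'
              exact ne_of_gt (lt_of_lt_of_le hlt this)
      obtain ⟨d', hd'N, hd'M, hd'E⟩ := ih hrp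
      have hd'r : ∀ c ∈ d', c ∈ rest.dropWhile (· == head) := fun c hc => (hd'M c).mp hc
      refine ⟨head :: d', ?_, ?_, ?_⟩
      · refine List.nodup_cons.mpr ⟨?_, hd'N⟩
        intro hmem
        exact hrne head (hd'r head hmem) rfl
      · intro c
        simp only [List.mem_cons, hd'M c]
        constructor
        · rintro (rfl | h)
          · exact Or.inl rfl
          · exact Or.inr (hrsub.subset h)
        · rintro (rfl | h)
          · exact Or.inl rfl
          · rw [← hrest] at h
            rcases List.mem_append.mp h with h' | h'
            · exact Or.inl (htall c h')
            · exact Or.inr h'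
      · rw [run_lengths]
        simp only [List.map_cons]
        congr 1
        · -- head entry: count (head :: rest) head = 1 + run length
          have h1 : List.count head (rest.takeWhile (· == head))
              = (rest.takeWhile (· == head)).length :=
            List.count_eq_length.mpr (fun b hb => (htall b hb).symm)
          have h2 : List.count head (rest.dropWhile (· == head)) = 0 :=
            List.count_eq_zero.mpr (fun h => hrne head h rfl)
          have hcrest : List.count head rest = (rest.takeWhile (· == head)).length := by
            conv_lhs => rw [← hrest]
            rw [List.count_append, h1, h2, Nat.add_zero]
          have hmain : PySem.List.count (head :: rest) head
              = 1 + (rest.takeWhile (· == head)).length := by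
            rw [PySem.List.count_eq]
            simp [hcrest, Nat.add_comm]
          rw [hmain]
        · -- tail entries
          rw [hd'E]
          apply List.map_congr_left
          intro c hc
          have hcr : c ∈ rest.dropWhile (· == head) := hd'r c hc
          have hcne : c ≠ head := hrne c hcr
          have hct : List.count c (rest.takeWhile (· == head)) = 0 :=
            List.count_eq_zero.mpr (fun h => hcne (htall c h))
          have hcrest : List.count c rest = List.count c (rest.dropWhile (· == head)) := by
            conv_lhs => rw [← hrest]
            rw [List.count_append, hct, Nat.zero_add]
          have hmain : PySem.List.count (head :: rest) c
              = PySem.List.count (rest.dropWhile (· == head)) c := by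
            rw [PySem.List.count_eq, PySem.List.count_eq]
            simp [hcrest, Ne.symm hcne]
          rw [hmain]

-- head of a ≤-pairwise list is a lower bound
theorem pairwise_head_le :
    ∀ (l : List Int), l.Pairwise (· ≤ ·) → ∀ a, l.head? = some a → ∀ y ∈ l, a ≤ y := by
  intro l
  cases l with
  | nil => intro _ a ha; cases ha
  | cons x xs =>
      intro h a ha y hy
      have hax : x = a := by simpa using ha
      subst hax
      rcases List.mem_cons.mp hy with rfl | hy'
      · exact le_refl _
      · exact List.rel_of_pairwise_cons h hy'

-- last of a ≤-pairwise list is an upper bound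
theorem pairwise_le_getLast :
    ∀ (l : List Int), l.Pairwise (· ≤ ·) → ∀ a, l.getLast? = some a → ∀ y ∈ l, y ≤ a := by
  intro l
  induction l with
  | nil => intro _ a ha; cases ha
  | cons x xs ih =>
      intro h a ha y hy
      cases xs with
      | nil =>
          have hax : x = a := by simpa using ha
          have hyx : y = x := by simpa using hy
          rw [hyx, hax]
      | cons x2 xs2 =>
          rw [List.getLast?_cons_cons] at ha
          have hamem : a ∈ x2 :: xs2 := List.mem_of_getLast? ha
          rcases List.mem_cons.mp hy with rfl | hy'
          · exact List.rel_of_pairwise_cons h hamem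
          · exact ih (List.Pairwise.of_cons h) a ha y hy'

-- the extremes of two ≤-pairwise permutations of each other coincide
theorem sorted_extremes_eq (u v : List Int) (hp : u.Perm v)
    (hu : u.Pairwise (· ≤ ·)) (hv : v.Pairwise (· ≤ ·)) :
    u.head? = v.head? ∧ u.getLast? = v.getLast? := by
  rcases u with _ | ⟨a, u'⟩
  · have : v = [] := hp.symm.eq_nil
    subst this
    exact ⟨rfl, rfl⟩
  · have hvne : v ≠ [] := by
      intro h
      subst h
      exact List.cons_ne_nil a u' hp.eq_nil
    obtain ⟨b, v', rfl⟩ := List.exists_cons_of_ne_nil hvne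
    constructor
    · have h1 : a ≤ b := pairwise_head_le _ hu a rfl b (hp.mem_iff.mpr List.mem_cons_self)
      have h2 : b ≤ a := pairwise_head_le _ hv b rfl a (hp.mem_iff.mp List.mem_cons_self)
      rw [List.head?_cons, List.head?_cons, le_antisymm h1 h2]
    · have hgu : (a :: u').getLast? = some ((a :: u').getLast (List.cons_ne_nil a u')) :=
        List.getLast?_eq_some_getLast (by simp)
      have hgv : (b :: v').getLast? = some ((b :: v').getLast (List.cons_ne_nil b v')) :=
        List.getLast?_eq_some_getLast (by simp)
      rw [hgu, hgv]
      have hmu : (a :: u').getLast (List.cons_ne_nil a u') ∈ a :: u' := List.getLast_mem _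
      have hmv : (b :: v').getLast (List.cons_ne_nil b v') ∈ b :: v' := List.getLast_mem _
      have h1 : (a :: u').getLast (List.cons_ne_nil a u')
          ≤ (b :: v').getLast (List.cons_ne_nil b v') :=
        pairwise_le_getLast _ hv _ hgv ((a :: u').getLast _) (hp.mem_iff.mp hmu)
      have h2 : (b :: v').getLast (List.cons_ne_nil b v')
          ≤ (a :: u').getLast (List.cons_ne_nil a u') :=
        pairwise_le_getLast _ hu _ hgu ((b :: v').getLast _) (hp.mem_iff.mpr hmv)
      rw [le_antisymm h1 h2]

-- ===== VERDICT (by name: the statement is the Claim_ definition above) =====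
theorem calculate_most_sub_least_spec : Claim_equal_calculate_most_sub_least := by
  intro formula _dom hpre
  unfold Spec_calculate_most_sub_least
  have hch : formula.toList ≠ [] := by
    intro h
    exact hpre (String.toList_eq_nil_iff.mp h)
  -- A's results list
  obtain ⟨M, N, P⟩ := foldA_inv formula.toList formula.toList PySem.Dict.empty []
    (fun c => by simp [PySem.Dict.get?_empty])
  set F := (formula.toList.foldl
      (fun (st : PySem.Dict Char Int × List (Char × Int)) char =>
        if st.1.get? char = none then
          (st.1.insert char (PySem.List.count formula.toList char : Int),
           st.2 ++ [(char, (PySem.List.count formula.toList char : Int))])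
        else st) (PySem.Dict.empty, [])).2 with hF
  have M' : ∀ c, c ∈ F.map Prod.fst ↔ c ∈ formula.toList := by
    intro c
    rw [M c]
    simp
  have N' : (F.map Prod.fst).Nodup := N List.nodup_nil
  have P' : ∀ p ∈ F, p.2 = (PySem.List.count formula.toList p.1 : Int) := by
    intro p hp
    rcases P p hp with h | h
    · cases h
    · exact h
  have hFsnd : F.map (fun x => x.2)
      = (F.map Prod.fst).map (fun c => (PySem.List.count formula.toList c : Int)) := by
    rw [List.map_map]
    exact List.map_congr_left (fun p hp => P' p hp)
  have hFne : F ≠ [] := by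
    obtain ⟨c0, l0, hc0⟩ := List.exists_cons_of_ne_nil hch
    have : c0 ∈ F.map Prod.fst := (M' c0).mpr (by rw [hc0]; exact List.mem_cons_self)
    intro h
    rw [h] at this
    cases this
  -- B's sorted characters and run lengths
  set S := PySem.List.sorted formula.toList (fun x => x) false with hS
  have hSp : S.Perm formula.toList := PySem.List.sorted_perm _ _ _
  have hSsorted : S.Pairwise (· ≤ ·) := by
    have := PySem.List.sorted_pairwise formula.toList (fun x => x)
    simpa using this
  obtain ⟨dB, hdBN, hdBM, hdBE⟩ := run_lengths_spec S hSsorted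
  have hdBM' : ∀ c, c ∈ dB ↔ c ∈ formula.toList := by
    intro c
    rw [hdBM c]
    exact hSp.mem_iff
  have hperm : (F.map Prod.fst).Perm dB :=
    (List.perm_ext_iff_of_nodup N' hdBN).mpr (fun c => by rw [M' c, hdBM' c])
  have hKB : run_lengths S = dB.map (fun c => (PySem.List.count formula.toList c : Int)) := by
    rw [hdBE]
    exact List.map_congr_left (fun c _ => by
      rw [PySem.List.count_eq, PySem.List.count_eq, hSp.count_eq])
  have hKperm : (F.map (fun x => x.2)).Perm (run_lengths S) := by
    rw [hFsnd, hKB]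
    exact hperm.map _
  -- the two sorted lists
  set SA := PySem.List.sorted F (fun x => x.2) false with hSA
  set SB := PySem.List.sorted (run_lengths S) (fun x => x) false with hSB
  have hSAperm : SA.Perm F := PySem.List.sorted_perm _ _ _
  have hSBperm : SB.Perm (run_lengths S) := PySem.List.sorted_perm _ _ _
  have hSAne : SA ≠ [] := by
    intro h
    have hp' := hSAperm
    rw [h] at hp'
    exact hFne hp'.symm.eq_nil
  have hRLne : run_lengths S ≠ [] := by
    intro h
    have := hKperm.length_eq
    rw [h] at this
    simp at this
    exact hFne (by simpa using this)
  have hSBne : SB ≠ [] := by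
    intro h
    have hp' := hSBperm
    rw [h] at hp'
    exact hRLne hp'.symm.eq_nil
  have hu : (SA.map (fun x => x.2)).Pairwise (· ≤ ·) :=
    PySem.List.sorted_map_key_pairwise F (fun x => x.2)
  have hv : SB.Pairwise (· ≤ ·) := by
    have := PySem.List.sorted_pairwise (run_lengths S) (fun x => x)
    simpa using this
  have hpuv : (SA.map (fun x => x.2)).Perm SB :=
    ((hSAperm.map (fun x => x.2)).trans hKperm).trans hSBperm.symm
  obtain ⟨hhead, hlast⟩ := sorted_extremes_eq _ _ hpuv hu hv
  -- unfold both programs down to head/last of the sorted lists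
  obtain ⟨a, SA', hSAeq⟩ := List.exists_cons_of_ne_nil hSAne
  obtain ⟨b, SB', hSBeq⟩ := List.exists_cons_of_ne_nil hSBne
  have hA0 : PySem.List.pyGetD SA 0 (' ', 0) = a := by
    rw [hSAeq]
    exact PySem.List.pyGetD_zero_cons _ _ _
  have hAlast : PySem.List.pyGetD SA (-1) (' ', 0) = SA.getLast hSAne :=
    PySem.List.pyGetD_neg_one SA (' ', 0) hSAne
  have hB0 : PySem.List.pyGetD SB 0 0 = b := by
    rw [hSBeq]
    exact PySem.List.pyGetD_zero_cons _ _ _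
  have hBlast : PySem.List.pyGetD SB (-1) 0 = SB.getLast hSBne :=
    PySem.List.pyGetD_neg_one SB 0 hSBne
  have hheads : a.2 = b := by
    rw [hSAeq] at hhead
    rw [hSBeq] at hhead
    simpa using hhead
  have hlasts : (SA.getLast hSAne).2 = SB.getLast hSBne := by
    rw [List.getLast?_map] at hlast
    rw [List.getLast?_eq_some_getLast hSAne, List.getLast?_eq_some_getLast hSBne] at hlast
    simpa using hlast
  show calculate_most_sub_least formula = calculate_most_sub_least_alt formula
  unfold calculate_most_sub_least calculate_most_sub_least_alt
  simp only [← hF, ← hS, ← hSA, ← hSB]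
  rw [hA0, hAlast, hB0, hBlast, hheads, hlasts]
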